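-- pv_equiv track=rewrite | github.com/amandalibre/DailyMobileDataUS | generate_output/Calendar_Methods.py | month_cols_and_labels
-- ===== SOURCE A (Python) =====
-- def month_cols_and_labels(months):
--     row_count = 1
--     month_row_amt = []
--     month_row_labels = []
--     for i in range(10):
--         if months[i] == months[i + 1]:
--             row_count += 1
--             if i == 9:
--                 month_row_amt.append(row_count)
--                 month_row_labels.append(months[i])
--         else:
--             month_row_amt.append(row_count)
--             month_row_labels.append(months[i])
--             row_count = 1
--             if i == 9:
--                 month_row_amt.append(row_count)
--                 month_row_labels.append(months[i + 1])
--     return month_row_amt, month_row_labels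
-- ===== SOURCE B (Python) =====
-- def month_cols_and_labels(months):
--     # locate run boundaries in months[0..10], then difference consecutive boundaries
--     positions = [0] + [i + 1 for i in range(10) if months[i] != months[i + 1]] + [11]
--     month_row_amt = []
--     month_row_labels = []
--     for start, end in zip(positions, positions[1:]):
--         month_row_amt.append(end - start)
--         month_row_labels.append(months[start])
--     return month_row_amt, month_row_labels
-- ===== Notes on version B (the rewrite author's own statement) =====
-- stated objective: alternative
-- what changed: B first collects the run-boundary positions of months[0..10] with a comprehension and then emits each run as the difference of consecutive boundaries with its start label, replacing A's running-counter emit-on-change scan with its i==9 special cases.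
import Mathlib
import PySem

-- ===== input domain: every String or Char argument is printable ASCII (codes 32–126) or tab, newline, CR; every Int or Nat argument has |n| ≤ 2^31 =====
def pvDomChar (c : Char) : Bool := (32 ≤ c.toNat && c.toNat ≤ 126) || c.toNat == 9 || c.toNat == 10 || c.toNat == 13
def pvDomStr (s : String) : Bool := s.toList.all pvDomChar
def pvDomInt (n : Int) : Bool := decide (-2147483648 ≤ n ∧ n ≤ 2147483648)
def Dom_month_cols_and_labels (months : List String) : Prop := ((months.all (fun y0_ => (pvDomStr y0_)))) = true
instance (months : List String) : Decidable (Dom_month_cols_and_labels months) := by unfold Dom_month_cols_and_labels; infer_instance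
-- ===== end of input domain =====

-- B locates the run boundaries of months[0..10] first and then differences consecutive
-- boundaries, instead of A's running-counter emit-on-change scan (objective: alternative decomposition).

-- ===== PORT A =====
-- pyGetD with default "" is exact only under Pre_ (all accessed indices 0..10 are then in range).
def month_cols_and_labels (months : List String) : List Int × List String :=
  let step : (Int × List Int × List String) → Int → (Int × List Int × List String) :=
    fun st i =>
      let row_count := st.1; let amt := st.2.1; let labels := st.2.2
      if PySem.List.pyGetD months i "" == PySem.List.pyGetD months (i + 1) "" then
        let rc := row_count + 1
        if i == 9 then (rc, amt ++ [rc], labels ++ [PySem.List.pyGetD months i ""])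
        else (rc, amt, labels)
      else
        let amt' := amt ++ [row_count]
        let labels' := labels ++ [PySem.List.pyGetD months i ""]
        if i == 9 then (1, amt' ++ [(1 : Int)], labels' ++ [PySem.List.pyGetD months (i + 1) ""])
        else (1, amt', labels')
  let r := (PySem.List.pyRange 0 10 1).foldl step (1, [], [])
  (r.2.1, r.2.2)

-- ===== PORT B =====
def month_cols_and_labels_alt (months : List String) : List Int × List String :=
  let get := fun (i : Int) => PySem.List.pyGetD months i ""
  let positions : List Int :=
    [0] ++ ((PySem.List.pyRange 0 10 1).filterMap (fun i =>
        if get i != get (i + 1) then some (i + 1) else none)) ++ [11]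
  let pairs := positions.zip (positions.drop 1)
  let r := pairs.foldl (fun (st : List Int × List String) p =>
      (st.1 ++ [p.2 - p.1], st.2 ++ [get p.1])) ([], [])
  (r.1, r.2)

-- ===== PRECONDITION & SPEC =====
-- Pre_ excludes lists shorter than 11 elements, on which the Python A raises IndexError at months[i+1].
def Pre_month_cols_and_labels (months : List String) : Prop := 11 ≤ months.length
instance (months : List String) : Decidable (Pre_month_cols_and_labels months) := by unfold Pre_month_cols_and_labels; infer_instance
def pvWitness_month_cols_and_labels : List String :=
  ["a", "a", "b", "b", "b", "c", "d", "d", "e", "e", "e"]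
def Spec_month_cols_and_labels (months : List String) (out : List Int × List String) : Prop := out = month_cols_and_labels_alt months
instance (months : List String) (out : List Int × List String) : Decidable (Spec_month_cols_and_labels months out) := by unfold Spec_month_cols_and_labels; infer_instance

-- ===== CLAIM (what is proved, stated in full; the proofs are below) =====
def Claim_equal_month_cols_and_labels : Prop := ∀ (months : List String), Dom_month_cols_and_labels months → Pre_month_cols_and_labels months → Spec_month_cols_and_labels months (month_cols_and_labels months)

-- ===== LEMMAS AND PROOFS =====

-- A's loop body, abstracted over the indexing function g i = months[i].
def pvStep (g : Int → String) (st : Int × List Int × List String) (i : Int) :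
    Int × List Int × List String :=
  let row_count := st.1; let amt := st.2.1; let labels := st.2.2
  if g i == g (i + 1) then
    let rc := row_count + 1
    if i == 9 then (rc, amt ++ [rc], labels ++ [g i])
    else (rc, amt, labels)
  else
    let amt' := amt ++ [row_count]
    let labels' := labels ++ [g i]
    if i == 9 then (1, amt' ++ [(1 : Int)], labels' ++ [g (i + 1)])
    else (1, amt', labels')

-- B's boundary predicate, abstracted the same way.
def pvPred (g : Int → String) (i : Int) : Option Int :=
  if g i != g (i + 1) then some (i + 1) else none

-- consecutive pairs of a list, as B builds them
def pvZP (xs : List Int) : List (Int × Int) := xs.zip (xs.drop 1)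

theorem pvBfold (g : Int → String) (ps : List (Int × Int)) (a1 : List Int) (a2 : List String) :
    ps.foldl (fun (st : List Int × List String) p =>
        (st.1 ++ [p.2 - p.1], st.2 ++ [g p.1])) (a1, a2)
      = (a1 ++ ps.map (fun p => p.2 - p.1), a2 ++ ps.map (fun p => g p.1)) := by
  induction ps generalizing a1 a2 with
  | nil => simp
  | cons p ps ih => simp [List.foldl_cons, ih]

theorem pvZP_cons (s c : Int) (r : List Int) :
    pvZP (s :: c :: r) = (s, c) :: pvZP (c :: r) := by
  simp [pvZP]

-- Main invariant: after the runs up to index a have been emitted and the current run started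
-- at s (g constant on [s, a]), A's remaining fold equals B's remaining boundary-difference list.
theorem pvMain (g : Int → String) : ∀ (k : Nat) (a s : Int) (amt : List Int) (labels : List String),
    a = 9 - (k : Int) → s ≤ a → (∀ j : Int, s ≤ j → j < a → g j = g a) →
    ((PySem.List.pyRange a 10 1).foldl (pvStep g) (a - s + 1, amt, labels)).2
      = (amt ++ (pvZP (s :: ((PySem.List.pyRange a 10 1).filterMap (pvPred g) ++ [11]))).map (fun p => p.2 - p.1),
         labels ++ (pvZP (s :: ((PySem.List.pyRange a 10 1).filterMap (pvPred g) ++ [11]))).map (fun p => g p.1)) := by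
  intro k
  induction k with
  | zero =>
    intro a s amt labels ha hsa hrun
    have ha' : a = 9 := by push_cast at ha; omega
    subst ha'
    have hgs : g s = g 9 := by
      rcases eq_or_lt_of_le hsa with h | h
      · rw [h]
      · exact hrun s le_rfl h
    have hr : PySem.List.pyRange 9 10 1 = [9] := by decide
    rw [hr]
    by_cases hb : g 9 = g 10
    · simp [pvStep, pvPred, pvZP, hb, hgs]
      omega
    · simp [pvStep, pvPred, pvZP, hb, hgs]
      omega
  | succ k ih =>
    intro a s amt labels ha hsa hrun
    have ha9 : a < 9 := by rw [ha]; push_cast; omega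
    have ha10 : a < 10 := by omega
    have hne9 : (a == 9) = false := by simp; omega
    rw [PySem.List.pyRange_one_cons ha10, List.foldl_cons]
    by_cases hb : g a = g (a + 1)
    · have h1 : pvStep g (a - s + 1, amt, labels) a = ((a + 1) - s + 1, amt, labels) := by
        simp [pvStep, hb, hne9]; omega
      have h2 : pvPred g a = none := by simp [pvPred, hb]
      rw [h1]
      simp only [List.filterMap_cons, h2]
      have hrun' : ∀ j : Int, s ≤ j → j < a + 1 → g j = g (a + 1) := by
        intro j hj hj'
        rcases lt_or_eq_of_le (show j ≤ a by omega) with h | h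
        · rw [hrun j hj h]; exact hb
        · rw [h]; exact hb
      exact ih (a + 1) s amt labels (by rw [ha]; push_cast; ring) (by omega) hrun'
    · have hgs : g s = g a := by
        rcases eq_or_lt_of_le hsa with h | h
        · rw [h]
        · exact hrun s le_rfl h
      have h1 : pvStep g (a - s + 1, amt, labels) a
          = ((a + 1) - (a + 1) + 1, amt ++ [a - s + 1], labels ++ [g a]) := by
        simp [pvStep, hb, hne9]
      have h2 : pvPred g a = some (a + 1) := by simp [pvPred, hb]
      rw [h1]
      simp only [List.filterMap_cons, h2]
      have hrun' : ∀ j : Int, a + 1 ≤ j → j < a + 1 → g j = g (a + 1) := by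
        intro j hj hj'; omega
      have hih := ih (a + 1) (a + 1) (amt ++ [a - s + 1]) (labels ++ [g a])
        (by rw [ha]; push_cast; ring) le_rfl hrun'
      rw [hih, List.cons_append, pvZP_cons]
      simp [hgs, List.append_assoc]
      omega

-- ===== VERDICT (by name: the statement is the Claim_ definition above) =====
theorem month_cols_and_labels_spec : Claim_equal_month_cols_and_labels := by
  intro months _ _
  show month_cols_and_labels months = month_cols_and_labels_alt months
  have h := pvMain (fun i => PySem.List.pyGetD months i "") 9 0 0 [] []
    (by norm_num) le_rfl (by intro j hj hj'; omega)
  simp only [show (0 : Int) - 0 + 1 = 1 from rfl] at h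
  have hA : month_cols_and_labels months
      = (((PySem.List.pyRange 0 10 1).foldl (pvStep (fun i => PySem.List.pyGetD months i "")) (1, [], [])).2.1,
         ((PySem.List.pyRange 0 10 1).foldl (pvStep (fun i => PySem.List.pyGetD months i "")) (1, [], [])).2.2) := rfl
  have hB : month_cols_and_labels_alt months
      = ((pvZP ((0 : Int) :: ((PySem.List.pyRange 0 10 1).filterMap (pvPred (fun i => PySem.List.pyGetD months i "")) ++ [11]))).foldl
            (fun (st : List Int × List String) p =>
              (st.1 ++ [p.2 - p.1], st.2 ++ [PySem.List.pyGetD months p.1 ""])) ([], [])) := rfl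
  rw [hA, hB, pvBfold (fun i => PySem.List.pyGetD months i ""), ← h]
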